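-- pv_equiv track=rewrite | github.com/selvarajb82/socialeagle | streamlit_concur_split/dist/launcher/_internal/concur_split_logic.py | split_by_exact_file_count
-- ===== SOURCE A (Python) =====
-- def split_by_exact_file_count(grouped, num_files):
--     """
--     EXACTLY num_files files.
--     Report keys are never split.
--     Balanced by record count.
--     """
--     groups = sorted(grouped.values(), key=len, reverse=True)
--
--     batches = [[] for _ in range(num_files)]
--     batch_sizes = [0] * num_files
--
--     for group in groups:
--         idx = batch_sizes.index(min(batch_sizes))
--         batches[idx].extend(group)
--         batch_sizes[idx] += len(group)
--
--     return batches
-- ===== SOURCE B (Python) =====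
-- def split_by_exact_file_count(grouped, num_files):
--     """
--     EXACTLY num_files files.
--     Report keys are never split.
--     Balanced by record count.
--     """
--     groups = sorted(grouped.values(), key=len, reverse=True)
--
--     batches = [[] for _ in range(num_files)]
--     # schedule of (size, batch index) pairs kept sorted ascending:
--     # the front is always the least-filled batch (lowest index on ties).
--     order = [(0, i) for i in range(num_files)]
--
--     for group in groups:
--         size, idx = order.pop(0)
--         batches[idx].extend(group)
--         entry = (size + len(group), idx)
--         # binary search for the insertion point keeping `order` sorted
--         lo, hi = 0, len(order)
--         while lo < hi:
--             mid = (lo + hi) // 2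
--             if order[mid] <= entry:
--                 lo = mid + 1
--             else:
--                 hi = mid
--         order.insert(lo, entry)
--
--     return batches
-- ===== Notes on version B (the rewrite author's own statement) =====
-- stated objective: faster
-- what changed: B replaces A's per-group linear min() scan plus .index() scan over batch_sizes with a maintained ascending list of (size, index) pairs: pop the front (the least-filled batch, lowest index on ties) and re-insert the updated pair at a position found by hand-written binary search.
import Mathlib
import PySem

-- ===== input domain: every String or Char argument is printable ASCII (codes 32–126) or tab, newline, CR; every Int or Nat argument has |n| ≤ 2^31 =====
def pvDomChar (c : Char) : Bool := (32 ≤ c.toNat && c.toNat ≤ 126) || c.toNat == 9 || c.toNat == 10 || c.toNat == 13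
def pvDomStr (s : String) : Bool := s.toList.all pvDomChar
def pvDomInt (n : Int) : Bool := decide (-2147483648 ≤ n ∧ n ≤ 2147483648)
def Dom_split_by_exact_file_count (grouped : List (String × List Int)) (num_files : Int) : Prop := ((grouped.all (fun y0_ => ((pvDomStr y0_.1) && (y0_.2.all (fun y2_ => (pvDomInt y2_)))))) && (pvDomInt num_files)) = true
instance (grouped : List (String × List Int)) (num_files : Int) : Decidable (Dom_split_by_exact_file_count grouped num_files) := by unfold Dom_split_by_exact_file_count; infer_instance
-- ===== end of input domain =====

-- B replaces A's per-iteration min()+.index() scans with a sorted (size, index) schedule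
-- list: pop the front, re-insert via binary search; same return value wherever A returns.


-- ===== PORT A =====
-- one iteration of A's loop body over state (batches, batch_sizes)
def pvAStep (st : List (List Int) × List Int) (group : List Int) : List (List Int) × List Int :=
  match PySem.List.min? st.2 (fun x => x) with
  | none => st          -- Python: min([]) raises ValueError; excluded by Pre_
  | some m =>
    match PySem.List.index? st.2 m with
    | none => st        -- unreachable: m is a member of batch_sizes
    | some idx =>
      (st.1.set idx (st.1.getD idx [] ++ group),
       st.2.set idx (st.2.getD idx 0 + (group.length : Int)))

def split_by_exact_file_count (grouped : List (String × List Int)) (num_files : Int) : List (List Int) :=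
  let groups := PySem.List.sorted (PySem.Dict.ofList grouped).values (fun g => g.length) true
  let batches : List (List Int) := (PySem.List.pyRange 0 num_files 1).map (fun _ => ([] : List Int))
  let sizes : List Int := List.replicate num_files.toNat 0   -- [0] * num_files
  (groups.foldl pvAStep (batches, sizes)).1

-- ===== PORT B =====
-- Source B's hand-written binary-search loop "while lo < hi: …": first position in the
-- ascending order list whose element is > x (lo, hi, mid are nonnegative ints, Nat is exact;
-- order[mid] is in range whenever read, so getD is exact)
def pvBisect (order : List (Int × Int)) (x : Int × Int) (lo hi : Nat) : Nat :=
  if _h : lo < hi then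
    let mid := (lo + hi) / 2
    let b := order.getD mid (0, 0)
    if b.1 < x.1 ∨ (b.1 = x.1 ∧ b.2 ≤ x.2) then pvBisect order x (mid + 1) hi
    else pvBisect order x lo mid
  else lo
termination_by hi - lo
decreasing_by all_goals omega

-- one iteration of B's loop body over state (batches, order); the popped index is always
-- a nonnegative in-range int, so .toNat indexing is exact
def pvBStep (st : List (List Int) × List (Int × Int)) (group : List Int) : List (List Int) × List (Int × Int) :=
  match st.2 with
  | [] => st            -- Python: order.pop(0) raises IndexError; excluded by Pre_
  | (size, idx) :: rest =>
      (st.1.set idx.toNat (st.1.getD idx.toNat [] ++ group),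
       rest.insertIdx (pvBisect rest (size + (group.length : Int), idx) 0 rest.length)
         (size + (group.length : Int), idx))

def split_by_exact_file_count_alt (grouped : List (String × List Int)) (num_files : Int) : List (List Int) :=
  let groups := PySem.List.sorted (PySem.Dict.ofList grouped).values (fun g => g.length) true
  let batches : List (List Int) := (PySem.List.pyRange 0 num_files 1).map (fun _ => ([] : List Int))
  let order : List (Int × Int) := (PySem.List.pyRange 0 num_files 1).map (fun i => ((0 : Int), i))
  (groups.foldl pvBStep (batches, order)).1

-- ===== PRECONDITION & SPEC =====
-- Pre_ excludes exactly the inputs where A raises: num_files < 1 with a nonempty grouped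
-- makes min([]) raise ValueError (B raises IndexError there).
def Pre_split_by_exact_file_count (grouped : List (String × List Int)) (num_files : Int) : Prop :=
  1 ≤ num_files ∨ grouped = []
instance (grouped : List (String × List Int)) (num_files : Int) : Decidable (Pre_split_by_exact_file_count grouped num_files) := by unfold Pre_split_by_exact_file_count; infer_instance
def pvWitness_split_by_exact_file_count : (List (String × List Int)) × Int := ([("a", [1, 2]), ("b", [3])], 2)

def Spec_split_by_exact_file_count (grouped : List (String × List Int)) (num_files : Int) (out : List (List Int)) : Prop := out = split_by_exact_file_count_alt grouped num_files
instance (grouped : List (String × List Int)) (num_files : Int) (out : List (List Int)) : Decidable (Spec_split_by_exact_file_count grouped num_files out) := by unfold Spec_split_by_exact_file_count; infer_instance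

-- ===== CLAIM (what is proved, stated in full; the proofs are below) =====
def Claim_equal_split_by_exact_file_count : Prop := ∀ (grouped : List (String × List Int)) (num_files : Int), Dom_split_by_exact_file_count grouped num_files → Pre_split_by_exact_file_count grouped num_files → Spec_split_by_exact_file_count grouped num_files (split_by_exact_file_count grouped num_files)

-- ===== LEMMAS AND PROOFS =====

-- lexicographic ≤ on (size, index) pairs, Python's tuple order
def pvLe (a b : Int × Int) : Prop := a.1 < b.1 ∨ (a.1 = b.1 ∧ a.2 ≤ b.2)

-- batch_sizes viewed as the list of (size, index) pairs
def pvEnum (sizes : List Int) : List (Int × Int) :=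
  (List.range sizes.length).map (fun i => (sizes.getD i 0, (i : Int)))

-- the invariant tying A's batch_sizes to B's order list
def pvInv (sizes : List Int) (order : List (Int × Int)) : Prop :=
  order.Pairwise pvLe ∧ (pvEnum sizes).Perm order

lemma pvLe_total (a b : Int × Int) (h : ¬ pvLe b a) : pvLe a b := by
  unfold pvLe at *; omega

lemma pvLe_trans (a b c : Int × Int) (h1 : pvLe a b) (h2 : pvLe b c) : pvLe a c := by
  unfold pvLe at *; omega

lemma pvBisect_spec (l : List (Int × Int)) (x : Int × Int)
    (hsort : l.Pairwise pvLe) :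
    ∀ (n lo hi : Nat), hi - lo ≤ n → lo ≤ hi → hi ≤ l.length →
      (∀ i (h : i < l.length), i < lo → pvLe l[i] x) →
      (∀ i (h : i < l.length), hi ≤ i → ¬ pvLe l[i] x) →
      pvBisect l x lo hi ≤ l.length ∧
      (∀ i (h : i < l.length), i < pvBisect l x lo hi → pvLe l[i] x) ∧
      (∀ i (h : i < l.length), pvBisect l x lo hi ≤ i → ¬ pvLe l[i] x) := by
  have hpw := List.pairwise_iff_getElem.1 hsort
  intro n
  induction n with
  | zero =>
    intro lo hi hn h1 h2 hlo hhi
    have hle : ¬ lo < hi := by omega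
    rw [pvBisect, dif_neg hle]
    refine ⟨by omega, fun i h hik => hlo i h hik, fun i h hki => hhi i h (by omega)⟩
  | succ n ih =>
    intro lo hi hn h1 h2 hlo hhi
    by_cases hlt : lo < hi
    · rw [pvBisect, dif_pos hlt]
      have hmid1 : lo ≤ (lo + hi) / 2 := by omega
      have hmid2 : (lo + hi) / 2 < hi := by omega
      have hmidl : (lo + hi) / 2 < l.length := by omega
      have hget : l.getD ((lo + hi) / 2) (0, 0) = l[(lo + hi) / 2] := by
        simp [List.getD_eq_getElem?_getD, List.getElem?_eq_getElem hmidl]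
      simp only [hget]
      by_cases hc : pvLe l[(lo + hi) / 2] x
      · have hc2 : l[(lo + hi) / 2].1 < x.1 ∨ (l[(lo + hi) / 2].1 = x.1 ∧ l[(lo + hi) / 2].2 ≤ x.2) := hc
        rw [if_pos hc2]
        apply ih ((lo + hi) / 2 + 1) hi (by omega) (by omega) h2
        · intro i h hik
          by_cases hi2 : i = (lo + hi) / 2
          · subst hi2; exact hc
          · by_cases hilo : i < lo
            · exact hlo i h hilo
            · exact pvLe_trans _ _ _ (hpw i ((lo + hi) / 2) h hmidl (by omega)) hc
        · exact hhi
      · have hc2 : ¬ (l[(lo + hi) / 2].1 < x.1 ∨ (l[(lo + hi) / 2].1 = x.1 ∧ l[(lo + hi) / 2].2 ≤ x.2)) := hc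
        rw [if_neg hc2]
        apply ih lo ((lo + hi) / 2) (by omega) (by omega) (by omega) hlo
        intro i h hik
        by_cases hi2 : i = (lo + hi) / 2
        · subst hi2; exact hc
        · intro hcon
          exact hc (pvLe_trans _ _ _ (hpw ((lo + hi) / 2) i hmidl h (by omega)) hcon)
    · rw [pvBisect, dif_neg hlt]
      refine ⟨by omega, fun i h hik => hlo i h hik, fun i h hki => hhi i h (by omega)⟩

lemma pvBisect_full (l : List (Int × Int)) (x : Int × Int) (hsort : l.Pairwise pvLe) :
    pvBisect l x 0 l.length ≤ l.length ∧
    (∀ i (h : i < l.length), i < pvBisect l x 0 l.length → pvLe l[i] x) ∧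
    (∀ i (h : i < l.length), pvBisect l x 0 l.length ≤ i → pvLe x l[i]) := by
  obtain ⟨h1, h2, h3⟩ := pvBisect_spec l x hsort l.length 0 l.length (by omega) (by omega)
    (le_refl _) (by omega) (by omega)
  exact ⟨h1, h2, fun i h hki => pvLe_total _ _ (h3 i h hki)⟩

lemma pairwise_insertIdx_pvLe (l : List (Int × Int)) (x : Int × Int) (k : Nat)
    (hk : k ≤ l.length) (hsort : l.Pairwise pvLe)
    (h1 : ∀ i (h : i < l.length), i < k → pvLe l[i] x)
    (h2 : ∀ i (h : i < l.length), k ≤ i → pvLe x l[i]) :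
    (l.insertIdx k x).Pairwise pvLe := by
  have hpw := List.pairwise_iff_getElem.1 hsort
  rw [List.pairwise_iff_getElem]
  intro i j hi hj hij
  have hlen : (l.insertIdx k x).length = l.length + 1 := by
    rw [List.length_insertIdx, if_pos hk]
  rw [hlen] at hi hj
  rw [List.getElem_insertIdx, List.getElem_insertIdx]
  split_ifs with hik hjk hjk' hik' hjk'' <;> try omega
  · exact hpw i j (by omega) (by omega) hij
  · exact h1 i (by omega) hik
  · exact hpw i (j - 1) (by omega) (by omega) (by omega)
  · exact h2 (j - 1) (by omega) (by omega)
  · exact hpw (i - 1) (j - 1) (by omega) (by omega) (by omega)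

lemma foldl_min_le_init (x : Int) (t : List Int) : t.foldl min x ≤ x := by
  induction t generalizing x with
  | nil => exact le_refl x
  | cons z t ih => exact le_trans (ih (min x z)) (min_le_left _ _)

lemma foldl_min_le_mem (x y : Int) (t : List Int) (h : y ∈ x :: t) :
    t.foldl min x ≤ y := by
  induction t generalizing x with
  | nil => simp at h; simp [h]
  | cons z t ih =>
    rcases List.mem_cons.1 h with rfl | h2
    · exact foldl_min_le_init _ _
    · rcases List.mem_cons.1 h2 with rfl | h3
      · exact le_trans (foldl_min_le_init (min x y) t) (min_le_right x y)
      · exact ih _ (List.mem_cons.2 (Or.inr h3))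

lemma le_foldl_min (m x : Int) (t : List Int) (hx : m ≤ x) (ht : ∀ y ∈ t, m ≤ y) :
    m ≤ t.foldl min x := by
  induction t generalizing x with
  | nil => simpa
  | cons z t ih =>
    exact ih _ (le_min hx (ht z (by simp))) (fun y hy => ht y (by simp [hy]))

lemma index?_of_least (xs : List Int) (v : Int) (j : Nat) (hj : j < xs.length)
    (hv : xs[j] = v) (hmin : ∀ i (h : i < xs.length), xs[i] = v → j ≤ i) :
    PySem.List.index? xs v = some j := by
  induction xs generalizing j with
  | nil => simp at hj
  | cons x t ih =>
    by_cases hx : x = v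
    · have h0 : j ≤ 0 := hmin 0 (by simp) (by simpa using hx)
      interval_cases j
      rw [hx, PySem.List.index?_cons_self]
    · have hj0 : j ≠ 0 := by
        rintro rfl; exact hx (by simpa using hv)
      obtain ⟨j', rfl⟩ := Nat.exists_eq_succ_of_ne_zero hj0
      rw [PySem.List.index?_cons_of_ne t hx]
      have hrec := ih j' (by simpa using hj) (by simpa using hv)
        (fun i hi hvi => by
          have := hmin (i + 1) (by simpa using hi) (by simpa using hvi)
          omega)
      rw [PySem.List.index?_eq_idxOf?] at hrec
      simp [hrec]

lemma mem_pvEnum (sizes : List Int) (p : Int × Int) :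
    p ∈ pvEnum sizes ↔ ∃ i, ∃ _ : i < sizes.length, p = (sizes.getD i 0, (i : Int)) := by
  simp only [pvEnum, List.mem_map, List.mem_range]
  constructor
  · rintro ⟨i, hi, rfl⟩; exact ⟨i, hi, rfl⟩
  · rintro ⟨i, hi, rfl⟩; exact ⟨i, hi, rfl⟩

-- the head of B's order list is exactly A's (min value, first index achieving it)
lemma pvInv_head (sizes : List Int) (order : List (Int × Int))
    (h : pvInv sizes order) (hne : sizes ≠ []) :
    ∃ (m : Int) (j : Nat) (t : List (Int × Int)),
      order = (m, (j : Int)) :: t ∧ j < sizes.length ∧ sizes.getD j 0 = m ∧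
      PySem.List.min? sizes (fun x => x) = some m ∧
      PySem.List.index? sizes m = some j := by
  obtain ⟨hpw, hperm⟩ := h
  have hlen : order.length = sizes.length := by
    simpa [pvEnum] using hperm.length_eq.symm
  cases horder : order with
  | nil => rw [horder] at hlen; cases sizes <;> simp_all
  | cons p t =>
    have hpmem : p ∈ pvEnum sizes := hperm.symm.subset (by simp [horder])
    obtain ⟨j, hj, rfl⟩ := (mem_pvEnum _ _).1 hpmem
    set m := sizes.getD j 0 with hm
    -- head is pvLe-below (or equal to) every pair of pvEnum sizes
    have hbelow : ∀ q ∈ pvEnum sizes, q = (m, (j : Int)) ∨ pvLe (m, (j : Int)) q := by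
      intro q hq
      have : q ∈ order := hperm.subset hq
      rw [horder] at this
      rcases List.mem_cons.1 this with rfl | hqt
      · exact Or.inl rfl
      · exact Or.inr ((List.pairwise_cons.1 (horder ▸ hpw)).1 q hqt)
    have hmle : ∀ i, ∀ _ : i < sizes.length, m ≤ sizes.getD i 0 := by
      intro i hi
      rcases hbelow (sizes.getD i 0, (i : Int)) ((mem_pvEnum _ _).2 ⟨i, hi, rfl⟩) with heq | hle
      · have h2 : sizes.getD i 0 = m := congrArg Prod.fst heq
        omega
      · rcases hle with h1 | ⟨h1, _⟩
        · have h1' : m < sizes.getD i 0 := h1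
          omega
        · have h1' : m = sizes.getD i 0 := h1
          omega
    have hjmin : ∀ i, ∀ _ : i < sizes.length, sizes.getD i 0 = m → j ≤ i := by
      intro i hi hvi
      rcases hbelow (sizes.getD i 0, (i : Int)) ((mem_pvEnum _ _).2 ⟨i, hi, rfl⟩) with heq | hle
      · have h2 : (i : Int) = (j : Int) := congrArg Prod.snd heq
        omega
      · rcases hle with h1 | ⟨h1, h2⟩
        · omega
        · have h2' : (j : Int) ≤ (i : Int) := h2
          omega
    have hgetD : ∀ i, ∀ _ : i < sizes.length, sizes.getD i 0 = sizes[i] := by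
      intro i hi; simp [List.getD_eq_getElem?_getD, List.getElem?_eq_getElem hi]
    refine ⟨m, j, t, rfl, hj, rfl, ?_, ?_⟩
    · -- min?
      cases hs : sizes with
      | nil => exact absurd hs hne
      | cons x t' =>
        rw [PySem.List.min?_id_cons]
        congr 1
        have hmem : m ∈ x :: t' := by
          rw [← hs]
          have := hgetD j hj
          rw [hm, this]
          exact List.getElem_mem _
        apply le_antisymm (foldl_min_le_mem _ _ _ hmem)
        · apply le_foldl_min
          · have h0 : (0 : Nat) < sizes.length := by rw [hs]; simp
            have := hmle 0 h0
            rw [hgetD 0 h0] at this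
            simpa [hs] using this
          · intro y hy
            have : y ∈ sizes := by rw [hs]; exact List.mem_cons.2 (Or.inr hy)
            obtain ⟨i, hi, rfl⟩ := List.mem_iff_getElem.1 this
            have := hmle i hi; rwa [hgetD i hi] at this
    · -- index?
      apply index?_of_least sizes m j hj
      · rw [← hgetD j hj, hm]
      · intro i hi hvi
        exact hjmin i hi (by rw [hgetD i hi, hvi])

lemma pvEnum_set (sizes : List Int) (j : Nat) (hj : j < sizes.length) (v : Int) :
    pvEnum (sizes.set j v) = (pvEnum sizes).set j (v, (j : Int)) := by
  apply List.ext_getElem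
  · simp [pvEnum]
  · intro i hi1 hi2
    have hi : i < sizes.length := by simpa [pvEnum] using hi1
    simp only [pvEnum, List.getElem_set, List.getElem_map, List.getElem_range]
    by_cases hij : j = i
    · subst hij
      simp [List.getD_eq_getElem?_getD, hj]
    · simp [List.getD_eq_getElem?_getD, List.getElem?_set_ne hij, hij]

lemma set_perm_cons_eraseIdx {α : Type} (l : List α) (j : Nat) (hj : j < l.length) (x : α) :
    (l.set j x).Perm (x :: l.eraseIdx j) := by
  rw [List.set_eq_take_append_cons_drop, if_pos hj, List.eraseIdx_eq_take_drop_succ]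
  exact List.perm_middle

lemma perm_cons_getElem_eraseIdx {α : Type} (l : List α) (j : Nat) (hj : j < l.length) :
    l.Perm (l[j] :: l.eraseIdx j) := by
  conv_lhs => rw [← List.take_append_drop j l]
  rw [List.eraseIdx_eq_take_drop_succ]
  have : l.drop j = l[j] :: l.drop (j + 1) := (List.getElem_cons_drop hj).symm
  rw [this]
  exact List.perm_middle

lemma pvEnum_getElem (sizes : List Int) (j : Nat) (hj : j < sizes.length) :
    (pvEnum sizes)[j]'(by simpa [pvEnum] using hj) = (sizes.getD j 0, (j : Int)) := by
  simp [pvEnum]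

-- the combined step lemma: same batches, invariant and length preserved
lemma pvStep_eq (bs : List (List Int)) (sizes : List Int) (order : List (Int × Int))
    (group : List Int) (h : pvInv sizes order) (hne : sizes ≠ []) :
    (pvAStep (bs, sizes) group).1 = (pvBStep (bs, order) group).1 ∧
    pvInv (pvAStep (bs, sizes) group).2 (pvBStep (bs, order) group).2 ∧
    (pvAStep (bs, sizes) group).2.length = sizes.length := by
  obtain ⟨m, j, t, horder, hj, hget, hmin, hidx⟩ := pvInv_head sizes order h hne
  have hjE : j < (pvEnum sizes).length := by simpa [pvEnum] using hj
  have hidx' := hidx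
  rw [PySem.List.index?_eq_idxOf?] at hidx'
  have hA : pvAStep (bs, sizes) group =
      (bs.set j (bs.getD j [] ++ group), sizes.set j (sizes.getD j 0 + (group.length : Int))) := by
    simp [pvAStep, hmin, hidx', List.getD_eq_getElem?_getD]
  have hB : pvBStep (bs, order) group =
      (bs.set j (bs.getD j [] ++ group),
       t.insertIdx (pvBisect t (m + (group.length : Int), (j : Int)) 0 t.length)
         (m + (group.length : Int), (j : Int))) := by
    simp [pvBStep, horder]
  rw [hA, hB]
  have htpw : t.Pairwise pvLe := by
    have hpw := h.1
    rw [horder] at hpw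
    exact (List.pairwise_cons.1 hpw).2
  obtain ⟨hk, hk1, hk2⟩ := pvBisect_full t (m + (group.length : Int), (j : Int)) htpw
  refine ⟨rfl, ⟨?_, ?_⟩, by simp⟩
  · -- pairwise
    exact pairwise_insertIdx_pvLe _ _ _ hk htpw hk1 hk2
  · -- perm
    have hperm := h.2
    rw [horder] at hperm
    have h1 : (pvEnum sizes).Perm ((m, (j : Int)) :: (pvEnum sizes).eraseIdx j) := by
      have := perm_cons_getElem_eraseIdx (pvEnum sizes) j hjE
      rwa [pvEnum_getElem sizes j hj, hget] at this
    have ht : ((pvEnum sizes).eraseIdx j).Perm t :=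
      List.Perm.cons_inv (h1.symm.trans hperm)
    set v := sizes.getD j 0 + (group.length : Int) with hv
    rw [pvEnum_set sizes j hj v]
    refine ((set_perm_cons_eraseIdx _ j hjE _).trans (ht.cons _)).trans ?_
    rw [hv, hget]
    exact (List.perm_insertIdx _ t hk).symm

lemma pvFold_eq (groups : List (List Int)) :
    ∀ (bs : List (List Int)) (sizes : List Int) (order : List (Int × Int)),
      pvInv sizes order → sizes ≠ [] →
      (groups.foldl pvAStep (bs, sizes)).1 = (groups.foldl pvBStep (bs, order)).1 := by
  induction groups with
  | nil => intro bs sizes order _ _; rfl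
  | cons g gs ih =>
    intro bs sizes order hinv hne
    obtain ⟨h1, h2, h3⟩ := pvStep_eq bs sizes order g hinv hne
    rw [List.foldl_cons, List.foldl_cons]
    have eA : pvAStep (bs, sizes) g = ((pvAStep (bs, sizes) g).1, (pvAStep (bs, sizes) g).2) := rfl
    have eB : pvBStep (bs, order) g = ((pvAStep (bs, sizes) g).1, (pvBStep (bs, order) g).2) := by
      rw [h1]
    rw [eA, eB]
    refine ih _ _ _ h2 ?_
    intro hnil
    rw [hnil] at h3
    simp at h3
    exact hne (List.eq_nil_of_length_eq_zero h3.symm)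

lemma pvInit_inv (n : Int) (hn : 1 ≤ n) :
    pvInv (List.replicate n.toNat 0)
      ((PySem.List.pyRange 0 n 1).map (fun i => ((0 : Int), i))) := by
  constructor
  · -- pairwise
    apply List.pairwise_map.2
    apply (PySem.List.pairwise_lt_pyRange_one 0 n).imp
    intro a b hab
    exact Or.inr ⟨rfl, le_of_lt hab⟩
  · -- perm: the two lists are in fact equal
    have : pvEnum (List.replicate n.toNat 0)
        = (PySem.List.pyRange 0 n 1).map (fun i => ((0 : Int), i)) := by
      rw [PySem.List.pyRange_one, List.map_map]
      simp only [pvEnum, List.length_replicate]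
      have hn0 : (n - 0).toNat = n.toNat := by omega
      rw [hn0]
      apply List.map_congr_left
      intro i hi
      have hi' : i < n.toNat := List.mem_range.1 hi
      simp [List.getD_eq_getElem?_getD, hi']
    rw [this]
-- ===== VERDICT (by name: the statement is the Claim_ definition above) =====
theorem split_by_exact_file_count_spec : Claim_equal_split_by_exact_file_count := by
  intro grouped num_files _ hpre
  unfold Spec_split_by_exact_file_count
  rcases hpre with hn | hnil
  · unfold split_by_exact_file_count split_by_exact_file_count_alt
    apply pvFold_eq _ _ _ _ (pvInit_inv num_files hn)
    intro h
    have := congrArg List.length h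
    simp at this
    omega
  · subst hnil
    rfl
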